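-- pv_equiv track=rewrite | github.com/alibaba/EasyNLP | diffusion/DiffSynth/DiffSynth/smoother/PySynthSmoother.py | query
-- ===== SOURCE A (Python) =====
-- def query(x):
--     z_list = []
--     z = -1
--     for i in range(10):
--         y = 1
--         while z + (y<<1)<=x:
--             y <<= 1
--         z += y
--         z_list.append(z)
--         if z==x:
--             break
--     return z_list
-- ===== SOURCE B (Python) =====
-- def query(x):
--     out = []
--     z = -1
--     for _ in range(10):
--         gap = x - z
--         # largest power of two <= gap (step size chosen greedily), 1 when gap < 1
--         y = 1 if gap < 1 else 1 << (gap.bit_length() - 1)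
--         z += y
--         out.append(z)
--         if z == x:
--             break
--     return out
-- ===== Notes on version B (the rewrite author's own statement) =====
-- stated objective: idiomatic
-- what changed: The inner doubling while-loop that searches for the step size is replaced by a closed-form computation: the step is the largest power of two <= x - z, obtained directly from gap.bit_length(); the outer greedy loop (at most 10 steps, break on z == x) is kept.
import Mathlib
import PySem

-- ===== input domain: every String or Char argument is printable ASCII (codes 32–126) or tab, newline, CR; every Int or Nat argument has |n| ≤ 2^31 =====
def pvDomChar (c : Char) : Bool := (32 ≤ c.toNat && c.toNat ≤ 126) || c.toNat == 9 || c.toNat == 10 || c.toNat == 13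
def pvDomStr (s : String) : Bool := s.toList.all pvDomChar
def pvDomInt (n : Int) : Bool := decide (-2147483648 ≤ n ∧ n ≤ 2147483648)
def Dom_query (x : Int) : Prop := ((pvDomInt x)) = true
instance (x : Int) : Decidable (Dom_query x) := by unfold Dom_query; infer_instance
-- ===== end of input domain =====

-- B replaces A's inner doubling while-loop by a closed-form step (largest power of two ≤ x - z
-- via bit_length); same outer greedy loop, same return value.

-- ===== PORT A =====
-- inner while-loop: y = 1; while z + (y<<1) <= x: y <<= 1   (y stays > 0, carried as a proof)
def queryDoubleY (x z : Int) (y : Int) (hy : 0 < y) : Int :=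
  if h : z + y * 2 ≤ x then queryDoubleY x z (y * 2) (by omega) else y
termination_by (x - z - y).toNat
decreasing_by omega

-- outer for i in range(10) with append and break
def queryLoopA (x : Int) : Nat → Int → List Int → List Int
  | 0, _, out => out
  | n + 1, z, out =>
    let y := queryDoubleY x z 1 (by norm_num)
    let z' := z + y
    let out' := out ++ [z']
    if z' = x then out' else queryLoopA x n z' out'

def query (x : Int) : List Int := queryLoopA x 10 (-1) []

-- ===== PORT B =====
-- y = 1 if gap < 1 else 1 << (gap.bit_length() - 1); for gap ≥ 1, that is 2 ^ Nat.log2 gap (exact)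
def queryStepB (x z : Int) : Int :=
  let gap := x - z
  if gap < 1 then 1 else (2 : Int) ^ Nat.log2 gap.toNat

def queryLoopB (x : Int) : Nat → Int → List Int
  | 0, _ => []
  | n + 1, z =>
    let z' := z + queryStepB x z
    if z' = x then [z'] else z' :: queryLoopB x n z'

def query_alt (x : Int) : List Int := queryLoopB x 10 (-1)

-- ===== PRECONDITION & SPEC =====
def Spec_query (x : Int) (out : List Int) : Prop := out = query_alt x
instance (x : Int) (out : List Int) : Decidable (Spec_query x out) := by unfold Spec_query; infer_instance

-- ===== CLAIM (what is proved, stated in full; the proofs are below) =====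
def Claim_equal_query : Prop := ∀ (x : Int), Dom_query x → Spec_query x (query x)

-- ===== LEMMAS AND PROOFS =====

-- characterisation of A's while-loop: the result is y·2^m, it overshoots (x < z + 2r),
-- and unless the loop never ran (m = 0) its half still satisfied the guard (z + r ≤ x)
theorem queryDoubleY_spec (x z y : Int) (hy : 0 < y) :
    ∃ m : Nat, queryDoubleY x z y hy = y * 2 ^ m ∧ x < z + 2 * (y * 2 ^ m) ∧
      (m = 0 ∨ z + y * 2 ^ m ≤ x) := by
  fun_induction queryDoubleY x z y hy with
  | case1 y hy h ih =>
    obtain ⟨m', hr, hlt, hle⟩ := ih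
    refine ⟨m' + 1, by rw [hr]; ring, by rw [show y * 2 ^ (m' + 1) = y * 2 * 2 ^ m' by ring]; omega, ?_⟩
    right
    rcases hle with hm0 | hle
    · subst hm0; simpa using h
    · calc z + y * 2 ^ (m' + 1) = z + y * 2 * 2 ^ m' := by ring_nf
        _ ≤ x := hle
  | case2 y hy h =>
    exact ⟨0, by simp, by omega, Or.inl rfl⟩

theorem queryDoubleY_eq_stepB (x z : Int) :
    queryDoubleY x z 1 (by norm_num) = queryStepB x z := by
  by_cases hg : x - z < 1
  · unfold queryDoubleY queryStepB
    rw [dif_neg (by omega)]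
    simp [hg]
  · -- gap ≥ 1: the result 2^m satisfies 2^m ≤ gap < 2^(m+1), so m = Nat.log2 gap
    obtain ⟨m, hr, hlt, hle⟩ := queryDoubleY_spec x z 1 (by norm_num)
    have hlow : (2 : Int) ^ m ≤ x - z := by
      rcases hle with hm0 | hle
      · subst hm0; omega
      · omega
    have hhigh : x - z < 2 ^ (m + 1) := by
      have : (2 : Int) ^ (m + 1) = 2 * (1 * 2 ^ m) := by ring
      omega
    have hgn : (1 : Int) ≤ x - z := by omega
    -- move to Nat
    have hlowN : 2 ^ m ≤ (x - z).toNat := by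
      have : ((2 : Int) ^ m) = ((2 ^ m : Nat) : Int) := by push_cast; ring
      omega
    have hhighN : (x - z).toNat < 2 ^ (m + 1) := by
      have : ((2 : Int) ^ (m + 1)) = ((2 ^ (m + 1) : Nat) : Int) := by push_cast; ring
      omega
    have hne : (x - z).toNat ≠ 0 := by omega
    have h1 : m ≤ Nat.log2 (x - z).toNat := (Nat.le_log2 hne).mpr hlowN
    have h2 : Nat.log2 (x - z).toNat < m + 1 := (Nat.log2_lt hne).mpr hhighN
    have hm : Nat.log2 (x - z).toNat = m := by omega
    rw [hr]
    unfold queryStepB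
    simp only []
    rw [if_neg (by omega), hm]
    ring

theorem queryLoopA_eq (x : Int) : ∀ (n : Nat) (z : Int) (out : List Int),
    queryLoopA x n z out = out ++ queryLoopB x n z := by
  intro n
  induction n with
  | zero => intro z out; simp [queryLoopA, queryLoopB]
  | succ n ih =>
    intro z out
    simp only [queryLoopA, queryLoopB, queryDoubleY_eq_stepB]
    by_cases h : z + queryStepB x z = x
    · simp [h]
    · simp only [if_neg h, ih]
      simp

-- ===== VERDICT (by name: the statement is the Claim_ definition above) =====
theorem query_spec : Claim_equal_query := by
  intro x _
  unfold Spec_query query query_alt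
  simpa using queryLoopA_eq x 10 (-1) []
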